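-- pv_equiv track=rewrite | github.com/lamnt205210/BlueOC-Entrance-Exam | task1/string_length_frequency.py | most_frequent_length
-- ===== SOURCE A (Python) =====
-- def most_frequent_length(strings: list[str]) -> list[str]:
--     if not strings:
--         return []
--
--     str_map = {}
--
--     for string in strings:
--         length = len(string)
--         if length not in str_map:
--             str_map[length] = []
--
--         str_map[length].append(string)
--
--     max_length = max(str_map)
--
--     result = str_map[max_length]
--
--     return result
-- ===== SOURCE B (Python) =====
-- def most_frequent_length(strings: list[str]) -> list[str]:
--     if not strings:
--         return []
--     max_length = max(len(s) for s in strings)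
--     return [s for s in strings if len(s) == max_length]
-- ===== Notes on version B (the rewrite author's own statement) =====
-- stated objective: simpler
-- what changed: Replaced the dict grouping all strings by length plus a max over keys with a direct two-pass max-of-lengths then filter of the original list; no dictionary is built.
import Mathlib
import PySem

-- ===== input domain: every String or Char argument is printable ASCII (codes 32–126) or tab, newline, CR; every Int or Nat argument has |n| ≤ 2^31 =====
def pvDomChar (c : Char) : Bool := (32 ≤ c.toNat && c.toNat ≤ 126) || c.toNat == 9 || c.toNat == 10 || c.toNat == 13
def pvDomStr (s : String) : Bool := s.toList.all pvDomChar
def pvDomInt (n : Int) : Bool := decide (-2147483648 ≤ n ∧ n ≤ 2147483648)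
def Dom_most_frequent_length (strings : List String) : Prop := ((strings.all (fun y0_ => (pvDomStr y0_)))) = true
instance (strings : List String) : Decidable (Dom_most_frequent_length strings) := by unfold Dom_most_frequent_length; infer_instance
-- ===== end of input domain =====

-- ===== PORT A =====
-- B drops A's length-keyed dict of lists: max length in one pass, then filter; simpler, same O(n).
def most_frequent_length (strings : List String) : List String :=
  if strings = [] then []
  else
    let str_map : PySem.Dict Int (List String) :=
      strings.foldl (fun d string =>
        let length := PySem.Str.len string
        let d := if d.contains length then d else d.insert length ([] : List String)
        d.insert length (d.getD length [] ++ [string])) PySem.Dict.empty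
    match PySem.List.max? str_map.keys (fun k => k) with
    | some max_length => str_map.getD max_length []
    | none => []

-- ===== PORT B =====
def most_frequent_length_alt (strings : List String) : List String :=
  if strings = [] then []
  else
    match PySem.List.max? (strings.map PySem.Str.len) (fun k => k) with
    | some max_length => strings.filter (fun s => PySem.Str.len s == max_length)
    | none => []

-- ===== PRECONDITION & SPEC =====
def Spec_most_frequent_length (strings : List String) (out : List String) : Prop := out = most_frequent_length_alt strings
instance (strings : List String) (out : List String) : Decidable (Spec_most_frequent_length strings out) := by unfold Spec_most_frequent_length; infer_instance

-- ===== CLAIM (what is proved, stated in full; the proofs are below) =====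
def Claim_equal_most_frequent_length : Prop := ∀ (strings : List String), Dom_most_frequent_length strings → Spec_most_frequent_length strings (most_frequent_length strings)

-- ===== LEMMAS AND PROOFS =====
lemma step_eq_modify (d : PySem.Dict Int (List String)) (k : Int) (s : String) :
    ((if d.contains k then d else d.insert k ([] : List String)).insert k
        ((if d.contains k then d else d.insert k ([] : List String)).getD k [] ++ [s]))
      = d.modify k [] (· ++ [s]) := by
  by_cases h : d.contains k
  · simp [h, PySem.Dict.modify]
  · have hg := PySem.Dict.getD_of_not_contains d ([] : List String) (k := k) (by simpa using h)
    simp [h, PySem.Dict.insert_insert_self, PySem.Dict.getD_insert_self, PySem.Dict.modify, hg]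
lemma max_ofList_eq (L : List Int) (hL : L ≠ []) :
    PySem.List.max? (PySem.Set.ofList L) (fun k => k) = PySem.List.max? L (fun k => k) := by
  have h1 : PySem.Set.ofList L ≠ [] := by
    cases L with
    | nil => exact absurd rfl hL
    | cons a t =>
      intro h
      have : a ∈ PySem.Set.ofList (a :: t) := (PySem.Set.mem_ofList _ _).2 (by simp)
      simp [h] at this
  have e1 : PySem.List.max? (PySem.Set.ofList L) (fun k => k) ≠ none := by
    rw [Ne, PySem.List.max?_eq_none_iff]; exact h1
  have e2 : PySem.List.max? L (fun k => k) ≠ none := by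
    rw [Ne, PySem.List.max?_eq_none_iff]; exact hL
  obtain ⟨ma, hma⟩ := Option.ne_none_iff_exists'.1 e1
  obtain ⟨mb, hmb⟩ := Option.ne_none_iff_exists'.1 e2
  have hmaL : ma ∈ L := (PySem.Set.mem_ofList _ _).1 (PySem.List.max?_mem hma)
  have hmbS : mb ∈ PySem.Set.ofList L := (PySem.Set.mem_ofList _ _).2 (PySem.List.max?_mem hmb)
  rw [hma, hmb]
  exact congrArg some (le_antisymm (PySem.List.max?_isMax hmb ma hmaL) (PySem.List.max?_isMax hma mb hmbS))

-- ===== VERDICT (by name: the statement is the Claim_ definition above) =====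
theorem most_frequent_length_spec : Claim_equal_most_frequent_length := by
  intro strings _
  unfold Spec_most_frequent_length most_frequent_length most_frequent_length_alt
  by_cases hs : strings = []
  · simp [hs]
  · simp only [hs, if_false]
    have hfold : strings.foldl (fun d string =>
        let length := PySem.Str.len string
        let d := if d.contains length then d else d.insert length ([] : List String)
        d.insert length (d.getD length [] ++ [string])) PySem.Dict.empty
        = strings.foldl (fun d s => d.modify (PySem.Str.len s) [] (· ++ [s])) PySem.Dict.empty := by
      exact PySem.List.foldl_congr_mem _ _ _ _ (fun d s _ => step_eq_modify d (PySem.Str.len s) s)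
    rw [hfold]
    have hkeys : (strings.foldl (fun d s => d.modify (PySem.Str.len s) [] (· ++ [s])) PySem.Dict.empty).keys
        = PySem.Set.ofList (strings.map PySem.Str.len) := by
      rw [PySem.Dict.keys_foldl_modify_key strings PySem.Str.len ([] : List String)
        (fun _ x => (· ++ [x])) PySem.Dict.empty]
      simp [PySem.Dict.keys_empty, PySem.Set.update_nil_left]
    rw [hkeys, max_ofList_eq _ (by simpa using hs)]
    cases hmax : PySem.List.max? (strings.map PySem.Str.len) (fun k => k) with
    | none => rfl
    | some m =>
      have hpairs : strings.foldl (fun d s => d.modify (PySem.Str.len s) [] (· ++ [s])) PySem.Dict.empty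
          = (strings.map (fun s => (PySem.Str.len s, s))).foldl
              (fun d p => d.modify p.1 [] (· ++ [p.2])) PySem.Dict.empty := by
        rw [List.foldl_map]
      dsimp only
      rw [hpairs, PySem.Dict.getD_foldl_modify_append]
      simp [List.filter_map, Function.comp_def, PySem.Dict.getD_empty]
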